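-- pv_equiv track=rewrite | github.com/ShunaMae/CompetitiveProgramming | Daily_Practice/2024.06/2024.06.27/B.py | find_final_position
-- ===== SOURCE A (Python) =====
-- def find_final_position(H, W, grid):
--     i, j = 0, 0
--
--     visited = set()
--
--     while True:
--
--         if (i, j) in visited:
--             return -1
--         visited.add((i, j))
--
--         direction = grid[i][j]
--
--         # 移動先を決定
--         if direction == 'U' and i != 0:
--             i -= 1
--         elif direction == 'D' and i != H - 1:
--             i += 1
--         elif direction == 'L' and j != 0:
--             j -= 1
--         elif direction == 'R' and j != W - 1:
--             j += 1
--         else: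
--             return [i + 1, j + 1]
-- ===== SOURCE B (Python) =====
-- def find_final_position(H, W, grid):
--     # Floyd tortoise-and-hare: each cell has one successor, so the walk is a path
--     # in a functional graph; a cycle is detected by two pointers meeting instead
--     # of a visited set (O(1) extra space).
--     def step(i, j):
--         d = grid[i][j]
--         if d == 'U' and i != 0:
--             return (i - 1, j)
--         if d == 'D' and i != H - 1:
--             return (i + 1, j)
--         if d == 'L' and j != 0:
--             return (i, j - 1)
--         if d == 'R' and j != W - 1:
--             return (i, j + 1)
--         return None
--
--     slow = fast = (0, 0)
--     while True:
--         nxt = step(*fast)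
--         if nxt is None:
--             return [fast[0] + 1, fast[1] + 1]
--         fast = nxt
--         nxt = step(*fast)
--         if nxt is None:
--             return [fast[0] + 1, fast[1] + 1]
--         fast = nxt
--         slow = step(*slow)
--         if slow == fast:
--             return -1
-- ===== Notes on version B (the rewrite author's own statement) =====
-- stated objective: alternative
-- what changed: Replaces the visited-set cycle detection with Floyd's tortoise-and-hare two-pointer algorithm on the functional graph of cells (hare advances two steps per iteration, tortoise one; a meeting proves a cycle), maintaining only two positions instead of a growing set. Pre_ excludes exactly the inputs on which A does not return a list: cyclic walks, where A (and B) return the int -1, which the declared return type List Int cannot represent, and walks indexing outside the grid, where A (and B) raise IndexError.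
-- outside the precondition, e.g. on find_final_position(2, 1, ['D', 'U']): A returns -1, B returns -1; on find_final_position(3, 3, ['D']): A raises IndexError, B raises IndexError
import Mathlib
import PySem

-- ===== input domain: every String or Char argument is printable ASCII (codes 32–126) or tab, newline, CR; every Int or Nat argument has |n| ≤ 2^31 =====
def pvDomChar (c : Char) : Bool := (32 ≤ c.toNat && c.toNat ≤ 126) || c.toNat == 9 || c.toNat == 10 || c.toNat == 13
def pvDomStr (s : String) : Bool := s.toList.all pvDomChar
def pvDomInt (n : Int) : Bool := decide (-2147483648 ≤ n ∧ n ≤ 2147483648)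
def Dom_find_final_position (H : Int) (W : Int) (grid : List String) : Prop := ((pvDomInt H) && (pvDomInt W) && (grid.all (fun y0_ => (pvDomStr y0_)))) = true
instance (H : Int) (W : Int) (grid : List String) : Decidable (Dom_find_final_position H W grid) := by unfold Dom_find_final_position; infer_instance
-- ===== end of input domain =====

-- B replaces A's visited set by Floyd's tortoise-and-hare cycle detection (two pointers,
-- O(1) extra space); objective: alternative algorithm, same time cost.
-- Both ports return [] where the Python raises IndexError or returns the int -1 (a value
-- outside the declared List Int type) — both situations are outside Pre_.

-- ===== PORT A =====
-- A's 'while True' loop as fuel recursion; inside Pre_ the walk exits within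
-- (number of grid characters) steps, so the fuel is never exhausted.
def pvLoopA (H : Int) (W : Int) (grid : List String) : Nat → PySem.Set (Int × Int) → Int → Int → List Int
  | 0, _, _, _ => []
  | fuel + 1, visited, i, j =>
    if PySem.Set.contains visited (i, j) then []   -- Python: 'return -1' (an int, not a list) — outside Pre_
    else
      let visited' := PySem.Set.add visited (i, j)
      match PySem.List.pyGet? grid i with
      | none => []                                  -- IndexError — outside Pre_
      | some row =>
        match PySem.Str.pyGet? row j with
        | none => []                                -- IndexError — outside Pre_
        | some direction =>
          if direction = 'U' ∧ i ≠ 0 then pvLoopA H W grid fuel visited' (i - 1) j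
          else if direction = 'D' ∧ i ≠ H - 1 then pvLoopA H W grid fuel visited' (i + 1) j
          else if direction = 'L' ∧ j ≠ 0 then pvLoopA H W grid fuel visited' i (j - 1)
          else if direction = 'R' ∧ j ≠ W - 1 then pvLoopA H W grid fuel visited' i (j + 1)
          else [i + 1, j + 1]

def find_final_position (H : Int) (W : Int) (grid : List String) : List Int :=
  pvLoopA H W grid ((grid.map (fun s => s.toList.length)).sum + 2) PySem.Set.empty 0 0

-- ===== PORT B =====
-- B's helper 'step': some (i', j') = move, none = the walk exits here; the outer
-- 'none' layer is the IndexError of grid[i][j] (outside Pre_).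
def pvStepB (H : Int) (W : Int) (grid : List String) (i j : Int) : Option (Option (Int × Int)) :=
  match PySem.List.pyGet? grid i with
  | none => none
  | some row =>
    match PySem.Str.pyGet? row j with
    | none => none
    | some d =>
      if d = 'U' ∧ i ≠ 0 then some (some (i - 1, j))
      else if d = 'D' ∧ i ≠ H - 1 then some (some (i + 1, j))
      else if d = 'L' ∧ j ≠ 0 then some (some (i, j - 1))
      else if d = 'R' ∧ j ≠ W - 1 then some (some (i, j + 1))
      else some none

-- B's 'while True' as fuel recursion over (slow, fast); fuel 0 and the slow = fast
-- meeting are B's 'return -1' (cycle, outside Pre_); in Python a slow that stepped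
-- off the exit would be None — modelled by the Option on slow (unreachable inside Pre_).
def pvLoopB (H : Int) (W : Int) (grid : List String) : Nat → Option (Int × Int) → (Int × Int) → List Int
  | 0, _, _ => []
  | fuel + 1, slow, fast =>
    match pvStepB H W grid fast.1 fast.2 with
    | none => []                                    -- IndexError — outside Pre_
    | some none => [fast.1 + 1, fast.2 + 1]
    | some (some f1) =>
      match pvStepB H W grid f1.1 f1.2 with
      | none => []                                  -- IndexError — outside Pre_
      | some none => [f1.1 + 1, f1.2 + 1]
      | some (some f2) =>
        match slow with
        | none => []                                -- Python: step(*None) TypeError — outside Pre_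
        | some s =>
          match pvStepB H W grid s.1 s.2 with
          | none => []                              -- IndexError — outside Pre_
          | some s' =>
            if s' = some f2 then []                 -- Python: 'return -1' (cycle) — outside Pre_
            else pvLoopB H W grid fuel s' f2

def find_final_position_alt (H : Int) (W : Int) (grid : List String) : List Int :=
  pvLoopB H W grid ((grid.map (fun s => s.toList.length)).sum + 1) (some (0, 0)) (0, 0)

-- ===== PRECONDITION & SPEC =====
-- One deterministic step of the walk (spec-side; used only by Pre_ and the proofs):
-- none = IndexError, some none = the walk exits here, some (some q) = move to q.
def pvStep (H : Int) (W : Int) (grid : List String) (p : Int × Int) : Option (Option (Int × Int)) :=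
  match PySem.List.pyGet? grid p.1 with
  | none => none
  | some row =>
    match PySem.Str.pyGet? row p.2 with
    | none => none
    | some d =>
      if d = 'U' ∧ p.1 ≠ 0 then some (some (p.1 - 1, p.2))
      else if d = 'D' ∧ p.1 ≠ H - 1 then some (some (p.1 + 1, p.2))
      else if d = 'L' ∧ p.2 ≠ 0 then some (some (p.1, p.2 - 1))
      else if d = 'R' ∧ p.2 ≠ W - 1 then some (some (p.1, p.2 + 1))
      else some none

-- pvDest n p = some q iff the walk from p reaches its exit cell q within n steps
-- (none on a too-short horizon, a cycle, or an IndexError).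
def pvDest (H : Int) (W : Int) (grid : List String) : Nat → (Int × Int) → Option (Int × Int)
  | 0, _ => none
  | n + 1, p =>
    match pvStep H W grid p with
    | none => none
    | some none => some p
    | some (some q) => pvDest H W grid n q

-- Pre_ admits exactly the inputs on which Python A returns a list: the walk from (0,0)
-- reaches an exit cell (within #grid-characters steps, which the pigeonhole grants any
-- exiting walk). Excluded: cyclic walks (A returns the int -1, outside the List Int type;
-- B returns -1 too) and walks that index outside the grid (A and B raise IndexError).
def Pre_find_final_position (H : Int) (W : Int) (grid : List String) : Prop :=
  (pvDest H W grid ((grid.map (fun s => s.toList.length)).sum) (0, 0)).isSome = true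

instance (H : Int) (W : Int) (grid : List String) : Decidable (Pre_find_final_position H W grid) := by
  unfold Pre_find_final_position; infer_instance

def pvWitness_find_final_position : Int × Int × List String := (1, 2, ["RX"])

def Spec_find_final_position (H : Int) (W : Int) (grid : List String) (out : List Int) : Prop := out = find_final_position_alt H W grid
instance (H : Int) (W : Int) (grid : List String) (out : List Int) : Decidable (Spec_find_final_position H W grid out) := by unfold Spec_find_final_position; infer_instance

-- ===== CLAIM (what is proved, stated in full; the proofs are below) =====
def Claim_equal_find_final_position : Prop := ∀ (H : Int) (W : Int) (grid : List String), Dom_find_final_position H W grid → Pre_find_final_position H W grid → Spec_find_final_position H W grid (find_final_position H W grid)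

-- ===== LEMMAS AND PROOFS =====

-- pvPath d p = some r: the walk makes d moves from p to r without exiting or erring.
def pvPath (H : Int) (W : Int) (grid : List String) : Nat → (Int × Int) → Option (Int × Int)
  | 0, p => some p
  | n + 1, p =>
    match pvStep H W grid p with
    | some (some q) => pvPath H W grid n q
    | _ => none

lemma pvDest_mono (H W : Int) (grid : List String) :
    ∀ (n : Nat) (p q : Int × Int), pvDest H W grid n p = some q →
      pvDest H W grid (n + 1) p = some q := by
  intro n
  induction n with
  | zero => intro p q h; simp [pvDest] at h
  | succ n ih =>
    intro p q h
    rw [pvDest] at h ⊢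
    cases hs : pvStep H W grid p with
    | none => rw [hs] at h; simp at h
    | some o =>
      cases o with
      | none => rw [hs] at h; simpa using h
      | some r => rw [hs] at h; dsimp only at h ⊢; exact ih r q h

lemma pvPath_snoc (H W : Int) (grid : List String) :
    ∀ (d : Nat) (s f f1 : Int × Int), pvPath H W grid d s = some f →
      pvStep H W grid f = some (some f1) → pvPath H W grid (d + 1) s = some f1 := by
  intro d
  induction d with
  | zero =>
    intro s f f1 hp hs
    simp [pvPath] at hp; subst hp
    simp [pvPath, hs]
  | succ d ih =>
    intro s f f1 hp hs
    rw [pvPath] at hp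
    cases hq : pvStep H W grid s with
    | none => rw [hq] at hp; simp at hp
    | some o =>
      cases o with
      | none => rw [hq] at hp; simp at hp
      | some r =>
        rw [hq] at hp; dsimp only at hp
        rw [pvPath, hq]; dsimp only
        exact ih r f f1 hp hs

-- no exit occurs within the horizon of a non-exiting path
lemma pvDest_none_of_path (H W : Int) (grid : List String) :
    ∀ (n : Nat) (m : Nat) (x y : Int × Int), pvPath H W grid m x = some y → n ≤ m →
      pvDest H W grid n x = none := by
  intro n
  induction n with
  | zero => intro m x y _ _; rfl
  | succ n ih =>
    intro m x y hp hnm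
    obtain ⟨m', rfl⟩ : ∃ m', m = m' + 1 := ⟨m - 1, by omega⟩
    rw [pvPath] at hp
    cases hs : pvStep H W grid x with
    | none => rw [hs] at hp; simp at hp
    | some o =>
      cases o with
      | none => rw [hs] at hp; simp at hp
      | some r =>
        rw [hs] at hp; dsimp only at hp
        rw [pvDest, hs]; dsimp only
        exact ih m' r y hp (by omega)

lemma pvDest_path_add (H W : Int) (grid : List String) :
    ∀ (a : Nat) (b : Nat) (x y : Int × Int), pvPath H W grid a x = some y →
      pvDest H W grid (a + b) x = pvDest H W grid b y := by
  intro a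
  induction a with
  | zero => intro b x y hp; simp [pvPath] at hp; subst hp; simp
  | succ a ih =>
    intro b x y hp
    rw [pvPath] at hp
    cases hs : pvStep H W grid x with
    | none => rw [hs] at hp; simp at hp
    | some o =>
      cases o with
      | none => rw [hs] at hp; simp at hp
      | some r =>
        rw [hs] at hp; dsimp only at hp
        have : a + 1 + b = (a + b) + 1 := by omega
        rw [this, pvDest, hs]; dsimp only
        exact ih b r y hp

-- a walk sitting on a non-trivial exit-free loop never exits
lemma pvDest_none_of_cycle (H W : Int) (grid : List String) (m : Nat) (x : Int × Int)
    (hm : 1 ≤ m) (hp : pvPath H W grid m x = some x) :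
    ∀ n, pvDest H W grid n x = none := by
  intro n
  induction n using Nat.strong_induction_on with
  | _ n ih =>
    by_cases hle : n ≤ m
    · exact pvDest_none_of_path H W grid n m x x hp hle
    · have h1 : pvDest H W grid (m + (n - m)) x = pvDest H W grid (n - m) x :=
        pvDest_path_add H W grid m (n - m) x x hp
      have h2 : m + (n - m) = n := by omega
      rw [h2] at h1
      rw [h1]
      exact ih (n - m) (by omega)

-- advance the tortoise one step under a hare d steps ahead
lemma pvPath_head (H W : Int) (grid : List String) (d : Nat) (s f f1 : Int × Int)
    (hp : pvPath H W grid d s = some f) (hs : pvStep H W grid f = some (some f1)) :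
    ∃ s1, pvStep H W grid s = some (some s1) ∧ pvPath H W grid d s1 = some f1 := by
  cases d with
  | zero =>
    simp [pvPath] at hp; subst hp
    exact ⟨f1, hs, by simp [pvPath]⟩
  | succ d =>
    rw [pvPath] at hp
    cases hq : pvStep H W grid s with
    | none => rw [hq] at hp; simp at hp
    | some o =>
      cases o with
      | none => rw [hq] at hp; simp at hp
      | some r =>
        rw [hq] at hp; dsimp only at hp
        exact ⟨r, rfl, pvPath_snoc H W grid d r f f1 hp hs⟩

-- loop A, one unfolding, expressed through pvStep
lemma pvLoopA_succ (H W : Int) (grid : List String) (fuel : Nat)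
    (vis : PySem.Set (Int × Int)) (i j : Int) :
    pvLoopA H W grid (fuel + 1) vis i j =
      if PySem.Set.contains vis (i, j) then []
      else
        match pvStep H W grid (i, j) with
        | none => []
        | some none => [i + 1, j + 1]
        | some (some q) => pvLoopA H W grid fuel (PySem.Set.add vis (i, j)) q.1 q.2 := by
  rw [pvLoopA, pvStep]
  by_cases hv : PySem.Set.contains vis (i, j) = true
  · rw [if_pos hv, if_pos hv]
  · rw [if_neg hv, if_neg hv]
    cases hrow : PySem.List.pyGet? grid i with
    | none => simp
    | some row =>
      dsimp only
      cases hc : PySem.Str.pyGet? row j with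
      | none => simp
      | some d => dsimp only; split_ifs <;> simp

-- loop A returns the exit cell of the walk
lemma pvLoopA_dest (H W : Int) (grid : List String) :
    ∀ (k : Nat) (p q : Int × Int) (vis : PySem.Set (Int × Int)) (fa : Nat),
      pvDest H W grid k p = some q →
      (∀ m, m < k → pvDest H W grid m p = none) →
      (∀ r ∈ vis, pvDest H W grid k r = none) →
      k ≤ fa →
      pvLoopA H W grid fa vis p.1 p.2 = [q.1 + 1, q.2 + 1] := by
  intro k
  induction k with
  | zero => intro p q vis fa h _ _ _; simp [pvDest] at h
  | succ k ih =>
    intro p q vis fa h hmin hvis hfa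
    obtain ⟨fa', rfl⟩ : ∃ fa', fa = fa' + 1 := ⟨fa - 1, by omega⟩
    have hnotmem : PySem.Set.contains vis (p.1, p.2) = false := by
      by_contra hc
      simp only [Bool.not_eq_false, PySem.Set.contains] at hc
      have hm : (p.1, p.2) ∈ vis := by simpa using List.mem_of_elem_eq_true hc
      have hnone := hvis _ hm
      rw [show ((p.1 : Int), (p.2 : Int)) = p from rfl] at hnone
      rw [hnone] at h; simp at h
    rw [pvDest] at h
    rw [pvLoopA_succ, hnotmem]
    simp only [Bool.false_eq_true, if_false]
    cases hs : pvStep H W grid (p.1, p.2) with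
    | none => rw [show ((p.1 : Int), (p.2 : Int)) = p from rfl] at hs; rw [hs] at h; simp at h
    | some o =>
      rw [show ((p.1 : Int), (p.2 : Int)) = p from rfl] at hs
      cases o with
      | none => rw [hs] at h; dsimp only at h ⊢; injection h with h; subst h; rfl
      | some r =>
        rw [hs] at h; dsimp only at h ⊢
        apply ih r q _ fa' h
        · intro m hm
          have hm1 := hmin (m + 1) (by omega)
          rw [pvDest, hs] at hm1; exact hm1
        · intro x hx
          rcases (PySem.Set.mem_add vis (p.1, p.2) x).mp hx with hx' | hx'
          · have h1 := hvis x hx'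
            cases hd : pvDest H W grid k x with
            | none => rfl
            | some w =>
              have hmono := pvDest_mono H W grid k x w hd
              rw [hmono] at h1; exact absurd h1 (by simp)
          · subst hx'
            have hk := hmin k (by omega)
            simpa using hk
        · omega

-- pvStepB is the spec step
lemma pvStepB_eq (H W : Int) (grid : List String) (p : Int × Int) :
    pvStepB H W grid p.1 p.2 = pvStep H W grid p := rfl

-- loop B (Floyd) returns the exit cell of the walk, whatever the tortoise's lag
lemma pvLoopB_dest (H W : Int) (grid : List String) :
    ∀ (k : Nat) (f q s : Int × Int) (d fuel : Nat),
      pvDest H W grid k f = some q →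
      pvPath H W grid d s = some f →
      k ≤ fuel →
      pvLoopB H W grid fuel (some s) f = [q.1 + 1, q.2 + 1] := by
  intro k
  induction k using Nat.strong_induction_on with
  | _ k ih =>
    intro f q s d fuel h hp hk
    match k, h with
    | 0, h => simp [pvDest] at h
    | k' + 1, h =>
      obtain ⟨fuel', rfl⟩ : ∃ u, fuel = u + 1 := ⟨fuel - 1, by omega⟩
      rw [pvDest] at h
      rw [pvLoopB, pvStepB_eq]
      cases hs : pvStep H W grid f with
      | none => rw [hs] at h; simp at h
      | some o =>
        cases o with
        | none =>
          rw [hs] at h; dsimp only at h ⊢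
          injection h with h; subst h; rfl
        | some f1 =>
          rw [hs] at h; dsimp only at h ⊢
          rw [pvStepB_eq]
          match k', h with
          | 0, h => simp [pvDest] at h
          | k'' + 1, h =>
            rw [pvDest] at h
            cases hs1 : pvStep H W grid f1 with
            | none => rw [hs1] at h; simp at h
            | some o1 =>
              cases o1 with
              | none =>
                rw [hs1] at h; dsimp only at h ⊢
                injection h with h; subst h; rfl
              | some f2 =>
                rw [hs1] at h; dsimp only at h ⊢
                obtain ⟨s1, hss, hp1⟩ := pvPath_head H W grid d s f f1 hp hs
                have hp2 : pvPath H W grid (d + 1) s1 = some f2 :=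
                  pvPath_snoc H W grid d s1 f1 f2 hp1 hs1
                rw [pvStepB_eq, hss]; dsimp only
                have hne : some s1 ≠ some f2 := by
                  intro he
                  injection he with he
                  subst he
                  have hcy := pvDest_none_of_cycle H W grid (d + 1) s1 (by omega) hp2 k''
                  rw [hcy] at h; simp at h
                rw [if_neg hne]
                exact ih k'' (by omega) f2 q s1 (d + 1) fuel' h hp2 (by omega)

-- ===== VERDICT (by name: the statement is the Claim_ definition above) =====
theorem find_final_position_spec : Claim_equal_find_final_position := by
  intro H W grid _ hpre
  unfold Spec_find_final_position find_final_position find_final_position_alt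
  unfold Pre_find_final_position at hpre
  set N := (grid.map (fun s => s.toList.length)).sum with hN
  have hex : ∃ m, (pvDest H W grid m (0, 0)).isSome = true := ⟨N, hpre⟩
  classical
  let k := Nat.find hex
  have hk : (pvDest H W grid k (0, 0)).isSome = true := Nat.find_spec hex
  obtain ⟨q, hq⟩ := Option.isSome_iff_exists.mp hk
  have hmin : ∀ m, m < k → pvDest H W grid m (0, 0) = none := by
    intro m hm
    have := Nat.find_min hex hm
    exact Option.not_isSome_iff_eq_none.mp (by simpa using this)
  have hkN : k ≤ N := Nat.find_le hpre
  have hA := pvLoopA_dest H W grid k (0, 0) q PySem.Set.empty (N + 2) hq hmin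
    (by intro r hr; simp [PySem.Set.empty] at hr) (by omega)
  have hB := pvLoopB_dest H W grid k (0, 0) q (0, 0) 0 (N + 1) hq (by simp [pvPath]) (by omega)
  rw [hA, hB]
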